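-- pv_equiv track=rewrite | github.com/levgou/pqtrees | pqtrees/scripts/front_size_dist.py | neighbour_set
-- ===== SOURCE A (Python) =====
-- def neighbour_set(perm, char):
--     indices = [i for i, x in enumerate(perm) if x == char]
--     neighbour_indeces = {
--         x - 1 for x in indices if x > 0
--     }.union({
--         x + 1 for x in indices if x < len(perm) - 1
--     })
--
--     neighbours = frozenset(perm[idx] for idx in neighbour_indeces)
--     return neighbours
-- ===== SOURCE B (Python) =====
-- def neighbour_set(perm, char):
--     pairs = list(zip(perm, perm[1:]))
--     left = [a for a, b in pairs if b == char]
--     right = [b for a, b in pairs if a == char]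
--     return frozenset(left + right)
-- ===== Notes on version B (the rewrite author's own statement) =====
-- stated objective: simpler
-- what changed: B scans adjacent pairs zip(perm, perm[1:]) and collects neighbour values directly, eliminating A's intermediate set of neighbour indices and the index arithmetic/bounds checks entirely.
import Mathlib
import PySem

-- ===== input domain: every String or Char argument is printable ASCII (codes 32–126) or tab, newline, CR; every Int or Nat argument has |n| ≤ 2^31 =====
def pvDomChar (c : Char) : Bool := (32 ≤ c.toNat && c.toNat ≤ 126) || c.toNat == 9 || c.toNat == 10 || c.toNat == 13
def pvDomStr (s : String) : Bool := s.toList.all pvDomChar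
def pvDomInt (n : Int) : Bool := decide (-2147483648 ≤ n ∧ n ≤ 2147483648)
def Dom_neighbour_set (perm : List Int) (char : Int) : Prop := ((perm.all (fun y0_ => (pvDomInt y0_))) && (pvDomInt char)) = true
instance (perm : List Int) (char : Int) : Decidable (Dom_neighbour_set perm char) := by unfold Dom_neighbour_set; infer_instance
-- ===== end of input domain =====

-- B collects neighbour VALUES directly from adjacent pairs zip(perm, perm[1:]), removing A's
-- intermediate set of neighbour indices (objective: simpler; return value proved equal).

-- ===== PORT A =====
def neighbour_set (perm : List Int) (char : Int) : List Int :=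
  let indices : List Int :=
    ((PySem.List.enumerate perm 0).filter (fun p => p.2 == char)).map (fun p => p.1)
  let s1 : PySem.Set Int :=
    PySem.Set.ofList ((indices.filter (fun x => decide (0 < x))).map (fun x => x - 1))
  let s2 : PySem.Set Int :=
    PySem.Set.ofList ((indices.filter (fun x => decide (x < (perm.length : Int) - 1))).map (fun x => x + 1))
  let neighbourIndeces : PySem.Set Int := PySem.Set.union s1 s2
  PySem.Set.ofList (neighbourIndeces.map (fun idx => PySem.List.pyGetD perm idx 0))

-- ===== PORT B =====
def neighbour_set_alt (perm : List Int) (char : Int) : List Int :=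
  let pairs := List.zip perm (PySem.List.slice perm (some 1) none)
  let left := (pairs.filter (fun p => p.2 == char)).map (fun p => p.1)
  let right := (pairs.filter (fun p => p.1 == char)).map (fun p => p.2)
  PySem.Set.ofList (left ++ right)

-- ===== PRECONDITION & SPEC =====
def Spec_neighbour_set (perm : List Int) (char : Int) (out : List Int) : Prop := out = neighbour_set_alt perm char
instance (perm : List Int) (char : Int) (out : List Int) : Decidable (Spec_neighbour_set perm char out) := by unfold Spec_neighbour_set; infer_instance

-- ===== CLAIM (what is proved, stated in full; the proofs are below) =====
def Claim_equal_neighbour_set : Prop := ∀ (perm : List Int) (char : Int), Dom_neighbour_set perm char → Spec_neighbour_set perm char (neighbour_set perm char)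

-- ===== LEMMAS AND PROOFS =====

-- s.update(set(l)) = s.update(l): duplicates are skipped either way
theorem pv_update_ofList {α : Type} [BEq α] [LawfulBEq α] (s : PySem.Set α) (l : List α) :
    PySem.Set.update s (PySem.Set.ofList l) = PySem.Set.update s l := by
  rw [PySem.Set.update_eq_append_filter, PySem.Set.update_eq_append_filter, PySem.Set.ofList_ofList]

-- set(a) | set(b) has the elements of a ++ b in first-occurrence order
theorem pv_union_ofList {α : Type} [BEq α] [LawfulBEq α] (a b : List α) :
    PySem.Set.union (PySem.Set.ofList a) (PySem.Set.ofList b) = PySem.Set.ofList (a ++ b) := by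
  show PySem.Set.update (PySem.Set.ofList a) (PySem.Set.ofList b) = _
  rw [pv_update_ofList, PySem.Set.ofList_append]

-- set(map f (set(l))) = set(map f l): first-occurrence dedup commutes with mapping
theorem pv_ofList_map_ofList {α β : Type} [BEq α] [LawfulBEq α] [BEq β] [LawfulBEq β]
    (f : α → β) (l : List α) :
    PySem.Set.ofList ((PySem.Set.ofList l).map f) = PySem.Set.ofList (l.map f) := by
  induction l using List.reverseRecOn with
  | nil => rfl
  | append_singleton l x ih =>
    rw [PySem.Set.ofList_append_singleton, List.map_append, List.map_singleton,
        PySem.Set.ofList_append_singleton]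
    by_cases hx : x ∈ l
    · rw [PySem.Set.add_of_mem (by simpa [PySem.Set.mem_ofList] using hx), ih]
      exact (PySem.Set.add_of_mem (by simp only [PySem.Set.mem_ofList]; exact List.mem_map.mpr ⟨x, hx, rfl⟩)).symm
    · rw [PySem.Set.add_of_not_mem (by simpa [PySem.Set.mem_ofList] using hx),
          List.map_append, List.map_singleton, PySem.Set.ofList_append_singleton, ih]

-- perm[i-1] where i is the index right after pre
theorem pv_pyGetD_pred (pre rest : List Int) (h : pre ≠ []) :
    PySem.List.pyGetD (pre ++ rest) ((pre.length : Int) - 1) 0 = pre.getLast h := by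
  have hp : 0 < pre.length := List.length_pos_iff.mpr h
  have e : ((pre.length : Int) - 1) = ((pre.length - 1 : Nat) : Int) := by omega
  rw [e, PySem.List.pyGetD_natCast, List.getD_eq_getElem?_getD,
      List.getElem?_append_left (by omega), List.getElem?_eq_getElem (by omega)]
  simp [List.getLast_eq_getElem]

-- perm[q.length] when perm = q ++ y :: rest
theorem pv_pyGetD_succ (q : List Int) (y : Int) (rest : List Int) :
    PySem.List.pyGetD (q ++ y :: rest) ((q.length : Int)) 0 = y := by
  rw [PySem.List.pyGetD_natCast, List.getD_eq_getElem?_getD,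
      List.getElem?_append_right (Nat.le_refl _)]
  simp

-- left neighbours: values at i-1 for occurrences i listed by enumerate, vs. the pair scan
theorem pv_leftAux (char : Int) (t : List Int) : ∀ (pre : List Int) (h : pre ≠ []),
    ((PySem.List.enumerate t ((pre.length : Int))).filter (fun p => p.2 == char)).map
        (fun p => PySem.List.pyGetD (pre ++ t) (p.1 - 1) 0)
    = ((List.zip (pre.getLast h :: t) t).filter (fun p => p.2 == char)).map (fun p => p.1) := by
  induction t with
  | nil => intro pre h; simp [PySem.List.enumerate_nil]
  | cons x t ih =>
    intro pre h
    have hne : pre ++ [x] ≠ [] := by simp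
    have htail := ih (pre ++ [x]) hne
    have e1 : (((pre ++ [x]).length : Int)) = ((pre.length : Int)) + 1 := by
      simp [List.length_append]
    have e2 : (pre ++ [x]) ++ t = pre ++ x :: t := by simp
    have e3 : (pre ++ [x]).getLast hne = x := by simp
    rw [e1, e2, e3] at htail
    rw [PySem.List.enumerate_cons, List.zip_cons_cons, List.filter_cons, List.filter_cons]
    by_cases hx : (x == char) = true
    · simp only [hx, if_pos, List.map_cons]
      rw [pv_pyGetD_pred pre (x :: t) h, htail]
    · simp only [hx, Bool.false_eq_true, if_neg, not_false_iff]
      exact htail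

-- right neighbours: values at i+1 for occurrences i listed by enumerate, vs. the pair scan
theorem pv_rightAux (char : Int) (t : List Int) : ∀ (pre : List Int),
    (((PySem.List.enumerate t ((pre.length : Int))).filter (fun p => p.2 == char)).filter
        (fun p => decide (p.1 < (((pre ++ t).length : Int)) - 1))).map
        (fun p => PySem.List.pyGetD (pre ++ t) (p.1 + 1) 0)
    = ((List.zip t t.tail).filter (fun p => p.1 == char)).map (fun p => p.2) := by
  induction t with
  | nil => intro pre; simp [PySem.List.enumerate_nil]
  | cons x t ih =>
    intro pre
    cases t with
    | nil =>
      simp [PySem.List.enumerate_cons, PySem.List.enumerate_nil, List.filter_cons]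
    | cons y t2 =>
      have htail := ih (pre ++ [x])
      have e1 : (((pre ++ [x]).length : Int)) = ((pre.length : Int)) + 1 := by
        simp [List.length_append]
      have e2 : (pre ++ [x]) ++ (y :: t2) = pre ++ x :: y :: t2 := by simp
      rw [e1, e2] at htail
      rw [PySem.List.enumerate_cons, List.tail_cons, List.zip_cons_cons]
      have hlt : decide (((pre.length : Int)) < (((pre ++ x :: y :: t2).length : Int)) - 1) = true := by
        simp only [List.length_append, List.length_cons, decide_eq_true_eq]
        push_cast
        omega
      by_cases hx : (x == char) = true
      · rw [List.filter_cons_of_pos (by simpa using hx),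
            List.filter_cons_of_pos (by simpa using hlt),
            List.filter_cons_of_pos (by simpa using hx),
            List.map_cons, List.map_cons, htail]
        congr 1
        have e3 : pre ++ x :: y :: t2 = (pre ++ [x]) ++ y :: t2 := by simp
        rw [e3, ← e1, pv_pyGetD_succ]
      · rw [List.filter_cons_of_neg (by simp [hx]),
            List.filter_cons_of_neg (by simp [hx])]
        exact htail

-- every index produced by enumerate t s is at least s
theorem pv_enumerate_fst_le (t : List Int) : ∀ (s : Int) (p : Int × Int),
    p ∈ PySem.List.enumerate t s → s ≤ p.1 := by
  induction t with
  | nil => intro s p hp; simp [PySem.List.enumerate_nil] at hp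
  | cons x t ih =>
    intro s p hp
    rw [PySem.List.enumerate_cons] at hp
    rcases List.mem_cons.mp hp with h | h
    · rw [h]
    · have := ih (s + 1) p h; omega

-- full equality of the two ports
theorem pv_main (perm : List Int) (char : Int) :
    neighbour_set perm char = neighbour_set_alt perm char := by
  simp only [neighbour_set, neighbour_set_alt]
  rw [PySem.List.slice_from_one, pv_union_ofList, pv_ofList_map_ofList, List.map_append]
  simp only [List.filter_map, List.map_map, Function.comp_def]
  congr 1
  congr 1
  · -- left neighbours
    cases perm with
    | nil => simp [PySem.List.enumerate_nil]
    | cons x t =>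
      rw [PySem.List.enumerate_cons]
      have hall : ((PySem.List.enumerate t (0 + 1)).filter (fun p => p.2 == char)).filter
            (fun p => decide (0 < p.1))
          = (PySem.List.enumerate t (0 + 1)).filter (fun p => p.2 == char) := by
        refine List.filter_eq_self.mpr (fun p hp => ?_)
        have h1 := pv_enumerate_fst_le t (0 + 1) p (List.mem_filter.mp hp).1
        simp only [decide_eq_true_eq]
        omega
      have hdrop : (((0, x) :: PySem.List.enumerate t (0 + 1)).filter
            (fun p => p.2 == char)).filter (fun p => decide ((0 : Int) < p.1))
          = (PySem.List.enumerate t (0 + 1)).filter (fun p => p.2 == char) := by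
        by_cases hx : (x == char) = true
        · rw [List.filter_cons_of_pos (by simpa using hx),
              List.filter_cons_of_neg (by simp), hall]
        · rw [List.filter_cons_of_neg (by simp [hx]), hall]
      rw [hdrop]
      have := pv_leftAux char t [x] (by simp)
      simpa using this
  · -- right neighbours
    have := pv_rightAux char perm []
    simpa using this

-- ===== VERDICT (by name: the statement is the Claim_ definition above) =====
theorem neighbour_set_spec : Claim_equal_neighbour_set := by
  intro perm char _
  unfold Spec_neighbour_set
  exact pv_main perm char
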